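-- pv_equiv track=rewrite | github.com/GabrielAlbaSerrano/Computational_Geometry | practica1.py | codigo_huffman
-- ===== SOURCE A (Python) =====
-- def codigo_huffman(estados,arbol):
--     result = {}
--     for i in range(len(estados)):
--         a = estados[i]
--         codigo = ''
--         for j in range(len(arbol)):
--             if a in list(arbol[j])[0]:
--                 codigo = '0' + codigo
--             if a in list(arbol[j])[1]:
--                 codigo = '1' + codigo
--         result[a] = codigo
--     return result
-- ===== SOURCE B (Python) =====
-- def codigo_huffman(estados, arbol):
--     # One pass over the tree: distribute each level's bit to its member states,
--     # then read the accumulated code for each requested state.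
--     if not estados:
--         return {}
--     code = {}
--     for nivel in arbol:
--         for bit, half in (('0', nivel[0]), ('1', nivel[1])):
--             for s in dict.fromkeys(half):
--                 code[s] = bit + code.get(s, '')
--     return {a: code.get(a, '') for a in estados}
-- ===== Notes on version B (the rewrite author's own statement) =====
-- stated objective: faster
-- what changed: Instead of re-scanning every tree level for every state (membership test per state per level), B walks the tree once, distributing each level's bit to the states that appear in that level via a dict, then reads off the code for each requested state.
import Mathlib
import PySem

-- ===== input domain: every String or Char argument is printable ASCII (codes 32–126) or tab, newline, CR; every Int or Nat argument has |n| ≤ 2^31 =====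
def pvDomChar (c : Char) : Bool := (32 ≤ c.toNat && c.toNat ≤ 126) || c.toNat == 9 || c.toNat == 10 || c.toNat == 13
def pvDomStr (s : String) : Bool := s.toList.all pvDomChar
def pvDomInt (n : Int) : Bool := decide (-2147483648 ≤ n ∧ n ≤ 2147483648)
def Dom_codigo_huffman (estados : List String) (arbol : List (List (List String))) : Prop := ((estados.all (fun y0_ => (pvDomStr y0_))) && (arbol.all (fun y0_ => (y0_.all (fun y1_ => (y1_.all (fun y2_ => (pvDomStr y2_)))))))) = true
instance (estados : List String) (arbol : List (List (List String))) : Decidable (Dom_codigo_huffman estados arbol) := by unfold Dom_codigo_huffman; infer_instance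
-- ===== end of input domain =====

-- B walks the tree once, distributing each level's bit to its member states through a dict,
-- instead of A's per-state re-scan of the whole tree (objective: faster, asymptotic).


-- ===== PORT A =====
-- the body of A's inner loop over the tree levels (two membership tests, two prepended bits)
def stepA (a : String) (codigo : List Char) (nivel : List (List String)) : List Char :=
  let codigo := if a ∈ PySem.List.pyGetD nivel 0 [] then '0' :: codigo else codigo
  if a ∈ PySem.List.pyGetD nivel 1 [] then '1' :: codigo else codigo

def codigo_huffman (estados : List String) (arbol : List (List (List String))) : List (String × String) :=
  (estados.foldl
    (fun (result : PySem.Dict String String) a =>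
      result.insert a (String.ofList (arbol.foldl (stepA a) [])))
    PySem.Dict.empty).items

-- ===== PORT B =====
-- give every (deduplicated) member state of one half its bit, prepended to its current code
def distribuir (code : PySem.Dict String (List Char)) (p : Char × List String) :
    PySem.Dict String (List Char) :=
  (PySem.List.dedup p.2).foldl (fun code s => code.insert s (p.1 :: code.getD s [])) code

-- one tree level of B's pass: both (bit, half) pairs of the level, in order
def pasoB (code : PySem.Dict String (List Char)) (nivel : List (List String)) :
    PySem.Dict String (List Char) :=
  [('0', PySem.List.pyGetD nivel 0 []), ('1', PySem.List.pyGetD nivel 1 [])].foldl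
    distribuir code

def codigo_huffman_alt (estados : List String) (arbol : List (List (List String))) : List (String × String) :=
  match estados with
  | [] => []  -- 'if not estados: return {}'
  | _ =>
    let code : PySem.Dict String (List Char) :=
      arbol.foldl pasoB PySem.Dict.empty
    (estados.foldl
      (fun (d : PySem.Dict String String) a => d.insert a (String.ofList (code.getD a [])))
      PySem.Dict.empty).items

-- ===== PRECONDITION & SPEC =====
-- Pre_ admits exactly the inputs on which the Python A returns: either no state is asked for
-- (A never touches the tree) or every tree level has at least two halves (else A's
-- arbol[j][0]/arbol[j][1] raises IndexError, and B raises there too).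
def Pre_codigo_huffman (estados : List String) (arbol : List (List (List String))) : Prop :=
  estados = [] ∨ ∀ nivel ∈ arbol, 2 ≤ nivel.length
instance (estados : List String) (arbol : List (List (List String))) : Decidable (Pre_codigo_huffman estados arbol) := by unfold Pre_codigo_huffman; infer_instance

def pvWitness_codigo_huffman : List String × List (List (List String)) :=
  (["a", "b"], [[["a"], ["b"]]])

def Spec_codigo_huffman (estados : List String) (arbol : List (List (List String))) (out : List (String × String)) : Prop := out = codigo_huffman_alt estados arbol
instance (estados : List String) (arbol : List (List (List String))) (out : List (String × String)) : Decidable (Spec_codigo_huffman estados arbol out) := by unfold Spec_codigo_huffman; infer_instance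

-- ===== CLAIM (what is proved, stated in full; the proofs are below) =====
def Claim_equal_codigo_huffman : Prop := ∀ (estados : List String) (arbol : List (List (List String))), Dom_codigo_huffman estados arbol → Pre_codigo_huffman estados arbol → Spec_codigo_huffman estados arbol (codigo_huffman estados arbol)

-- ===== LEMMAS AND PROOFS =====

-- updating each of a duplicate-free batch of keys once, read back through getD
lemma getD_foldl_insert_bit (ys : List String) (hys : ys.Nodup) (bit : Char)
    (d : PySem.Dict String (List Char)) (x : String) :
    ((ys.foldl (fun code s => code.insert s (bit :: code.getD s [])) d).getD x []) =
      if x ∈ ys then bit :: d.getD x [] else d.getD x [] := by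
  induction ys generalizing d with
  | nil => simp
  | cons s rest ih =>
    simp only [List.foldl_cons]
    rcases List.nodup_cons.mp hys with ⟨hs, hrest⟩
    rw [ih hrest]
    by_cases hx : x ∈ rest
    · have hxs : x ≠ s := fun h => hs (h ▸ hx)
      simp [hx, hxs, PySem.Dict.getD_insert]
    · by_cases hxs : x = s
      · subst hxs; simp [hx]
      · simp [hx, hxs, PySem.Dict.getD_insert]

-- one tree level of B's pass changes each state's code exactly as A's inner-loop body does
lemma getD_level (nivel : List (List String)) (d : PySem.Dict String (List Char)) (x : String) :
    ((pasoB d nivel).getD x []) = stepA x (d.getD x []) nivel := by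
  simp only [pasoB, List.foldl_cons, List.foldl_nil, distribuir]
  rw [getD_foldl_insert_bit _ (PySem.List.nodup_dedup _) '1' _ x,
      getD_foldl_insert_bit _ (PySem.List.nodup_dedup _) '0' d x]
  simp [stepA]

-- B's single pass over the whole tree accumulates, per state, exactly A's inner fold
lemma getD_code (arbol : List (List (List String))) (d : PySem.Dict String (List Char)) (x : String) :
    ((arbol.foldl pasoB d).getD x []) = arbol.foldl (stepA x) (d.getD x []) := by
  induction arbol generalizing d with
  | nil => rfl
  | cons nivel rest ih => simp only [List.foldl_cons]; rw [ih, getD_level]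

-- a fold inserting a value that depends only on the key, read back through getD
lemma getD_foldl_insert_fun (f : String → String) (l : List String)
    (d : PySem.Dict String String) (x : String) (dflt : String) :
    ((l.foldl (fun d a => d.insert a (f a)) d).getD x dflt) =
      if x ∈ l then f x else d.getD x dflt := by
  induction l generalizing d with
  | nil => simp
  | cons a rest ih =>
    simp only [List.foldl_cons]
    rw [ih]
    by_cases hx : x ∈ rest
    · simp [hx]
    · by_cases hxa : x = a
      · subst hxa; simp [hx]
      · simp [hx, hxa, PySem.Dict.getD_insert]

-- both ports' output dicts, as items lists, keyed by the deduplicated estados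
lemma items_foldl_insert_fun (f : String → String) (l : List String) :
    ((l.foldl (fun d a => d.insert a (f a)) PySem.Dict.empty).items) =
      (PySem.List.dedup l).map (fun a => (a, f a)) := by
  have hnd : (l.foldl (fun d a => d.insert a (f a)) PySem.Dict.empty).keys.Nodup :=
    PySem.Dict.nodup_keys_foldl_insert l _ _ PySem.Dict.nodup_keys_empty
  rw [PySem.Dict.items_eq_map_keys _ hnd ""]
  rw [PySem.Dict.keys_foldl_insert]
  have hkeys : PySem.Set.update (PySem.Dict.empty : PySem.Dict String String).keys l
      = PySem.List.dedup l := by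
    simp [PySem.Set.update, PySem.List.dedup_eq_ofList, PySem.Set.ofList_eq_foldl,
      PySem.Dict.keys_empty]
  rw [hkeys]
  apply List.map_congr_left
  intro a ha
  rw [getD_foldl_insert_fun]
  simp [(PySem.List.mem_dedup _ _).mp ha]

-- ===== VERDICT (by name: the statement is the Claim_ definition above) =====
theorem codigo_huffman_spec : Claim_equal_codigo_huffman := by
  intro estados arbol _ _
  show codigo_huffman estados arbol = codigo_huffman_alt estados arbol
  match estados with
  | [] => rfl
  | a0 :: rest =>
    unfold codigo_huffman codigo_huffman_alt
    rw [items_foldl_insert_fun (fun a => String.ofList (arbol.foldl (stepA a) [])) (a0 :: rest),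
        items_foldl_insert_fun _ (a0 :: rest)]
    apply List.map_congr_left
    intro a _
    rw [getD_code]
    simp [PySem.Dict.getD_empty]
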